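-- pv_equiv track=rewrite | github.com/bilaloguz/cryptology | python/cryptology/classical/transposition/columnar/myszkowski.py | _get_myszkowski_order
-- ===== SOURCE A (Python) =====
-- def _get_myszkowski_order(keyword: str) -> list:
--     """
--     Get column order using Myszkowski method.
--
--     In Myszkowski, repeated letters are handled specially.
--     The order is the same as alphabetical, but repeated letters
--     have the same position value.
--
--     Args:
--         keyword: The keyword (converted to lowercase)
--
--     Returns:
--         List of (char, order_value) tuples sorted by char
--     """
--     keyword_lower = keyword.lower()
--
--     # Count occurrences of each letter
--     from collections import Counter
--     counts = Counter()
--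
--     # Build tuples: (char, original_position)
--     char_positions = [(c, i) for i, c in enumerate(keyword_lower)]
--
--     # Assign positions, handling repeated letters
--     result = []
--     char_to_position = {}
--
--     # First pass: get unique chars in sorted order
--     unique_chars = sorted(set(keyword_lower))
--
--     # Assign position based on sorted order of unique chars
--     for pos, char in enumerate(unique_chars):
--         char_to_position[char] = pos
--
--     # Apply to all characters
--     for char, orig_pos in char_positions:
--         result.append((char, char_to_position[char], orig_pos))
--
--     # Sort by (char, orig_pos) to handle ties
--     result.sort(key=lambda x: (x[0], x[2]))
--
--     return result
-- ===== SOURCE B (Python) =====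
-- def _get_myszkowski_order(keyword: str) -> list:
--     # Counting-sort / bucket approach: no comparison sort at all.
--     # Bucket the original positions by (lowercased) character, then sweep
--     # the character codes upward from the smallest to the largest present,
--     # emitting each non-empty bucket with a dense rank.
--     keyword_lower = keyword.lower()
--     buckets = {}
--     for i, c in enumerate(keyword_lower):
--         buckets.setdefault(c, []).append(i)
--     if not buckets:
--         return []
--     result = []
--     rank = 0
--     for code in range(min(map(ord, buckets)), max(map(ord, buckets)) + 1):
--         c = chr(code)
--         if c in buckets:
--             for i in buckets[c]:
--                 result.append((c, rank, i))
--             rank += 1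
--     return result
-- ===== Notes on version B (the rewrite author's own statement) =====
-- stated objective: alternative
-- what changed: Replaces A's comparison sorts (sorted(set(...)) plus a final result.sort over all tuples) and char-to-rank dict by a counting sort: one pass buckets original positions per character, then a sweep over the character-code range min..max emits each non-empty bucket with a running dense rank; no comparison sort is performed.
import Mathlib
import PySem

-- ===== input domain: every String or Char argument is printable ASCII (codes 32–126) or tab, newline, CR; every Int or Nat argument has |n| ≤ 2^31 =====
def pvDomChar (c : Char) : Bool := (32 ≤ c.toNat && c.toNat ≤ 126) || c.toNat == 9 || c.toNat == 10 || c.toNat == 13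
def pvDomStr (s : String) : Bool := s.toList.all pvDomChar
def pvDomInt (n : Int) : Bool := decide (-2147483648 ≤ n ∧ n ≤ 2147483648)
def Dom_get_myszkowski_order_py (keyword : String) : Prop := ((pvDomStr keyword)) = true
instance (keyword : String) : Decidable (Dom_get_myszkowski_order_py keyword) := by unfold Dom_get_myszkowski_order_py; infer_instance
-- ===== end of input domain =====

-- B replaces A's comparison sorts (sorted(set(..)) plus the final result.sort) and char→rank dict
-- by a counting sort: bucket positions per character, then sweep the code range min..max upward,
-- emitting each non-empty bucket with a running dense rank (objective: alternative algorithm).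

-- ===== PORT A =====
-- Python: _get_myszkowski_order.  char_to_position[char] is ported as getD _ 0: every looked-up
-- char is a char of the keyword, hence a key of the dict, so the KeyError branch is unreachable.
def get_myszkowski_order_py (keyword : String) : List (String × Int × Int) :=
  let keyword_lower : List Char := PySem.Chars.lower keyword.toList
  let _counts : PySem.Dict Char Int := PySem.Dict.empty   -- `counts = Counter()` (never used by A)
  let char_positions : List (Char × Int) :=
    (PySem.List.enumerate keyword_lower 0).map (fun p => (p.2, p.1))
  let unique_chars : List Char :=
    PySem.List.sorted (PySem.Set.ofList keyword_lower) (fun c => c) false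
  let char_to_position : PySem.Dict Char Int :=
    (PySem.List.enumerate unique_chars 0).foldl (fun d p => d.insert p.2 p.1) PySem.Dict.empty
  let result : List (String × Int × Int) :=
    char_positions.foldl
      (fun acc p => acc ++ [(String.ofList [p.1], char_to_position.getD p.1 0, p.2)]) []
  PySem.List.sorted2 result (fun x => x.1) (fun x => x.2.2) false

-- ===== PORT B =====
-- Python Source B.  `buckets.setdefault(c, []).append(i)` is ported as `d.modify c [] (· ++ [i])`
-- (append when present, else insert [i]): exact.  `buckets[c]` is read as getD c [] only under
-- `c in buckets`, so the KeyError branch is unreachable.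
-- the body of Source B's sweep loop (named so the proofs can speak about it)
def stepB (buckets : PySem.Dict Char (List Int)) :
    List (String × Int × Int) × Int → Int → List (String × Int × Int) × Int :=
  fun st code =>
    let c := Char.ofNat code.toNat
    if buckets.contains c then
      ((buckets.getD c []).foldl
         (fun rr i => rr ++ [(String.ofList [c], st.2, i)]) st.1,
       st.2 + 1)
    else st

def get_myszkowski_order_py_alt (keyword : String) : List (String × Int × Int) :=
  let keyword_lower : List Char := PySem.Chars.lower keyword.toList
  let buckets : PySem.Dict Char (List Int) :=
    (PySem.List.enumerate keyword_lower 0).foldl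
      (fun d p => d.modify p.2 [] (fun l => l ++ [p.1])) PySem.Dict.empty
  if buckets.keys = [] then []            -- `if not buckets: return []`
  else
    match PySem.List.min? (buckets.keys.map (fun c => (c.toNat : Int))) (fun x => x),
          PySem.List.max? (buckets.keys.map (fun c => (c.toNat : Int))) (fun x => x) with
    | some mn, some mx =>
        ((PySem.List.pyRange mn (mx + 1) 1).foldl (stepB buckets) ([], 0)).1
    | _, _ => []                          -- unreachable: buckets.keys ≠ []

-- ===== PRECONDITION & SPEC =====
def Spec_get_myszkowski_order_py (keyword : String) (out : List (String × Int × Int)) : Prop := out = get_myszkowski_order_py_alt keyword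
instance (keyword : String) (out : List (String × Int × Int)) : Decidable (Spec_get_myszkowski_order_py keyword out) := by unfold Spec_get_myszkowski_order_py; infer_instance

-- ===== CLAIM (what is proved, stated in full; the proofs are below) =====
def Claim_equal_get_myszkowski_order_py : Prop := ∀ (keyword : String), Dom_get_myszkowski_order_py keyword → Spec_get_myszkowski_order_py keyword (get_myszkowski_order_py keyword)

-- ===== LEMMAS AND PROOFS =====

-- Both programs sort by a two-component key; name it as one lexicographic key.
theorem sorted2_eq_sorted_toLex {α κ₁ κ₂ : Type} [LinearOrder κ₁] [LinearOrder κ₂]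
    (xs : List α) (k1 : α → κ₁) (k2 : α → κ₂) :
    PySem.List.sorted2 xs k1 k2 false
      = PySem.List.sorted xs (fun x => toLex (k1 x, k2 x)) false := by
  have hb : (fun a b => decide (k1 a < k1 b) || (!decide (k1 b < k1 a) && decide (k2 a < k2 b)))
      = (fun a b => decide (toLex (k1 a, k2 a) < toLex (k1 b, k2 b))) := by
    funext a b
    rcases lt_trichotomy (k1 a) (k1 b) with h | h | h
    · simp [Prod.Lex.toLex_lt_toLex, h, not_lt_of_gt h]
    · simp [Prod.Lex.toLex_lt_toLex, h]
    · simp only [Prod.Lex.toLex_lt_toLex]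
      simp [not_lt_of_gt h, h]
      intro he
      exact absurd (he ▸ h) (lt_irrefl _)
  unfold PySem.List.sorted2 PySem.List.sorted
  simp only [Bool.false_eq_true, if_false, hb]

-- single-character strings compare exactly as their characters
theorem ofList_singleton_lt_iff (c d : Char) :
    (String.ofList [c] < String.ofList [d]) ↔ c < d := by
  rw [String.lt_iff_toList_lt]
  simp only [String.toList_ofList, List.cons_lt_cons_iff]
  constructor
  · rintro (h | ⟨rfl, h⟩)
    · exact h
    · exact absurd h (by exact fun h => by cases h)
  · exact Or.inl

-- Char order is code order; chr/ord round trips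
theorem char_lt_iff (c d : Char) : c < d ↔ c.toNat < d.toNat := by
  rw [Char.lt_def, Char.toNat, Char.toNat]; exact UInt32.lt_iff_toNat_lt

theorem chr_toNat (n : Nat) (h : n < 55296) : (Char.ofNat n).toNat = n := by
  rw [Char.toNat_ofNat, if_pos (Or.inl h)]

-- lowercasing a domain character stays in the ASCII code range
theorem dom_lower_le (c : Char) (h : pvDomChar c = true) :
    (PySem.Chars.lowerChar c).toNat ≤ 126 := by
  have hc : c.toNat ≤ 126 := by
    simp only [pvDomChar, Bool.or_eq_true, Bool.and_eq_true, decide_eq_true_eq,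
      beq_iff_eq] at h
    omega
  unfold PySem.Chars.lowerChar
  split
  · rename_i hu
    simp only [PySem.Chars.isupper, Bool.and_eq_true, decide_eq_true_eq] at hu
    have h90 : c.toNat ≤ 90 := by
      have h1 := hu.2
      rw [Char.le_def] at h1
      exact UInt32.le_iff_toNat_le.mp h1
    rw [chr_toNat _ (by omega)]
    omega
  · exact hc

-- A's dict maps each char of unique_chars to its index there
theorem getD_rank (us : List Char) (h : us.Nodup) (c : Char) (hc : c ∈ us) :
    ((PySem.List.enumerate us 0).foldl (fun d p => d.insert p.2 p.1) PySem.Dict.empty).getD c 0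
      = (us.idxOf c : Int) := by
  have hitems := PySem.Dict.items_foldl_insert_fresh (PySem.List.enumerate us 0)
      (fun p => p.2) (fun p => p.1) PySem.Dict.empty
      (by intro a _; simp [PySem.Dict.contains_empty])
      (by rw [PySem.List.map_snd_enumerate]; exact h)
  apply PySem.Dict.getD_of_mem_items
  · rw [hitems]
    have hk : us.idxOf c < us.length := List.idxOf_lt_length_of_mem hc
    have hmem : ((us.idxOf c : Int), c) ∈ PySem.List.enumerate us 0 := by
      rw [PySem.List.mem_enumerate_iff]
      exact ⟨us.idxOf c, hk, by simp [List.getElem_idxOf hk]⟩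
    simp only [PySem.Dict.empty, List.nil_append]
    exact List.mem_map.mpr ⟨_, hmem, rfl⟩
  · exact PySem.Dict.nodup_keys_foldl_insert_key (PySem.List.enumerate us 0)
      (fun p => p.2) (fun d p => p.1) PySem.Dict.empty (by simp [PySem.Dict.keys_empty])

-- B's sweep, abstracted: emit the bucket of each char in the list, ranks counting up from r
def runB (bk : Char → List Int) : List Char → Int → List (String × Int × Int)
  | [], _ => []
  | c :: rest, r =>
    (bk c).map (fun i => (String.ofList [c], r, i)) ++ runB bk rest (r + 1)

-- the code sweep of B's port is runB over the chars of the present codes, in code order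
theorem foldB (buckets : PySem.Dict Char (List Int)) :
    ∀ (L : List Int) (res : List (String × Int × Int)) (r : Int),
      (L.foldl (stepB buckets) (res, r)).1
      = res ++ runB (fun c => buckets.getD c [])
          ((L.filter (fun code => buckets.contains (Char.ofNat code.toNat))).map
            (fun code => Char.ofNat code.toNat)) r := by
  intro L
  induction L with
  | nil => intro res r; simp [runB]
  | cons x L ih =>
    intro res r
    rw [List.foldl_cons, List.filter_cons]
    by_cases hx : buckets.contains (Char.ofNat x.toNat) = true
    · have hstep : stepB buckets (res, r) x
          = (res ++ (buckets.getD (Char.ofNat x.toNat) []).map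
              (fun i => (String.ofList [Char.ofNat x.toNat], r, i)), r + 1) := by
        simp only [stepB]
        rw [if_pos hx, PySem.List.foldl_append_singleton_eq_map]
      rw [hstep, ih, hx, if_pos rfl, List.map_cons, runB, List.append_assoc]
    · simp only [Bool.not_eq_true] at hx
      have hstep : stepB buckets (res, r) x = (res, r) := by
        simp only [stepB]
        rw [if_neg (by simp [hx])]
      rw [hstep, ih, hx]
      simp

-- runB emits rank g c for each char when g counts up along the list
theorem runB_eq_flatMap (bk : Char → List Int) (g : Char → Int) :
    ∀ (vs : List Char) (r : Int),
      (∀ (k : Nat) (h : k < vs.length), g vs[k] = r + k) →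
      runB bk vs r
        = vs.flatMap (fun c => (bk c).map (fun i => (String.ofList [c], g c, i))) := by
  intro vs
  induction vs with
  | nil => intro r _; simp [runB]
  | cons c rest ih =>
    intro r hg
    have h0 : g c = r := by simpa using hg 0 (by simp)
    rw [runB, List.flatMap_cons, h0,
      ih (r + 1) (fun k hk => by
        have h := hg (k + 1) (by simpa using Nat.succ_lt_succ hk)
        rw [List.getElem_cons_succ] at h
        rw [h]; push_cast; ring)]

-- partitioning a list of pairs by its (distinct, covering) first components is a permutation
theorem partition_perm :
    ∀ (us : List Char) (l : List (Char × Int)), us.Nodup → (∀ p ∈ l, p.1 ∈ us) →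
      (us.flatMap (fun c => l.filter (fun p => p.1 == c))).Perm l := by
  intro us
  induction us with
  | nil =>
    intro l _ hcov
    cases l with
    | nil => simp
    | cons p t => exact absurd (hcov p (by simp)) (by simp)
  | cons c us' ih =>
    intro l hnd hcov
    rw [List.flatMap_cons]
    have hcnot : c ∉ us' := (List.nodup_cons.mp hnd).1
    have hrw : us'.flatMap (fun c' => l.filter (fun p => p.1 == c'))
        = us'.flatMap (fun c' => (l.filter (fun p => !(p.1 == c))).filter (fun p => p.1 == c')) := by
      refine List.flatMap_congr (fun c' hc' => ?_)
      have hcne : c' ≠ c := fun he => hcnot (he ▸ hc')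
      rw [List.filter_filter]
      refine (List.filter_congr (fun p _ => ?_)).symm
      by_cases hp : p.1 = c'
      · have : (p.1 == c) = false := by
          rw [beq_eq_false_iff_ne, hp]; exact hcne
        simp [hp, hcne]
      · simp [hp]
    rw [hrw]
    have hsub : ∀ p ∈ l.filter (fun p => !(p.1 == c)), p.1 ∈ us' := by
      intro p hp
      have hm := List.mem_filter.mp hp
      have := hcov p hm.1
      rcases List.mem_cons.mp this with h | h
      · exact absurd h (by simpa using hm.2)
      · exact h
    have hperm := ih (l.filter (fun p => !(p.1 == c))) (List.nodup_cons.mp hnd).2 hsub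
    exact List.Perm.trans (List.Perm.append_left _ hperm) (List.filter_append_perm _ l)

-- ===== VERDICT (by name: the statement is the Claim_ definition above) =====
theorem get_myszkowski_order_py_spec : Claim_equal_get_myszkowski_order_py := by
  intro keyword hdom
  unfold Spec_get_myszkowski_order_py
  unfold Dom_get_myszkowski_order_py pvDomStr at hdom
  rw [List.all_eq_true] at hdom
  simp only [get_myszkowski_order_py, get_myszkowski_order_py_alt]
  by_cases hnil : PySem.Chars.lower keyword.toList = []
  · rw [hnil]; decide
  set cs : List Char := PySem.Chars.lower keyword.toList with hcs_def
  set cp : List (Char × Int) := (PySem.List.enumerate cs 0).map (fun p => (p.2, p.1)) with hcp_def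
  set us : List Char := PySem.List.sorted (PySem.Set.ofList cs) (fun c => c) false with hus_def
  set g : Char → Int := fun c => (us.idxOf c : Int) with hg_def
  set f : Char × Int → String × Int × Int :=
    fun p => (String.ofList [p.1], g p.1, p.2) with hf_def
  set buckets : PySem.Dict Char (List Int) :=
    (PySem.List.enumerate cs 0).foldl
      (fun d p => d.modify p.2 [] (fun l => l ++ [p.1])) PySem.Dict.empty with hbk_def
  -- domain: every char of cs has code ≤ 126
  have hcs126 : ∀ c ∈ cs, c.toNat ≤ 126 := by
    intro c hc
    rw [hcs_def, PySem.Chars.lower, List.mem_map] at hc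
    obtain ⟨c₀, hc₀, rfl⟩ := hc
    exact dom_lower_le c₀ (hdom c₀ hc₀)
  -- shared facts about us and cp
  have hus_perm : us.Perm (PySem.Set.ofList cs) := PySem.List.sorted_perm _ _ _
  have hus_nodup : us.Nodup := (hus_perm.symm).nodup (PySem.Set.nodup_ofList cs)
  have hmem_us : ∀ x, x ∈ us ↔ x ∈ cs := fun x => by
    rw [hus_def, PySem.List.mem_sorted, PySem.Set.mem_ofList]
  have hus_pair : us.Pairwise (· < ·) := PySem.List.sorted_ofList_pairwise_lt cs
  have hcp_fst : cp.map (fun p => p.1) = cs := by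
    rw [hcp_def, List.map_map]
    exact PySem.List.map_snd_enumerate cs 0
  have hcp_snd : cp.Pairwise (fun a b => a.2 < b.2) := by
    rw [hcp_def]
    exact List.pairwise_map.mpr (PySem.List.pairwise_lt_enumerate cs 0)
  -- B's dict of buckets: keys and contents
  have hkeys : buckets.keys = PySem.Set.ofList cs := by
    have h := PySem.Dict.keys_foldl_modify_key (PySem.List.enumerate cs 0)
      (fun p => p.2) ([] : List Int) (fun _ p => (fun l => l ++ [p.1])) PySem.Dict.empty
    simp only [hbk_def]
    rw [h, PySem.List.map_snd_enumerate, PySem.Dict.keys_empty,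
      PySem.Set.ofList_eq_foldl]
    rfl
  have hcontains : ∀ c, buckets.contains c = true ↔ c ∈ cs := by
    intro c
    rw [PySem.Dict.contains_iff_mem_keys, hkeys, PySem.Set.mem_ofList]
  have hbuck : ∀ c, buckets.getD c []
      = (cp.filter (fun p => p.1 == c)).map (fun p => p.2) := by
    intro c
    have hb2 : buckets
        = cp.foldl (fun d q => d.modify q.1 [] (fun l => l ++ [q.2])) PySem.Dict.empty := by
      rw [hcp_def, List.foldl_map]
    rw [hb2, PySem.Dict.getD_foldl_modify_append]
    simp [PySem.Dict.getD, PySem.Dict.get?, PySem.Dict.empty]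
  -- the keys are nonempty, so min/max exist
  have hne : PySem.Set.ofList cs ≠ [] := by
    intro hempty
    obtain ⟨a, t, hc⟩ := List.exists_cons_of_ne_nil hnil
    have ha : a ∈ PySem.Set.ofList cs := (PySem.Set.mem_ofList _ _).mpr (by rw [hc]; simp)
    rw [hempty] at ha
    simp at ha
  rw [hkeys]
  rw [if_neg hne]
  rcases hmn : PySem.List.min? ((PySem.Set.ofList cs).map (fun c => (c.toNat : Int)))
      (fun x => x) with _ | mn
  · exact absurd ((PySem.List.min?_eq_none_iff _ _).mp hmn) (by simp [hne])
  rcases hmx : PySem.List.max? ((PySem.Set.ofList cs).map (fun c => (c.toNat : Int)))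
      (fun x => x) with _ | mx
  · exact absurd ((PySem.List.max?_eq_none_iff _ _).mp hmx) (by simp [hne])
  simp only [hmn, hmx]
  -- bounds on mn and mx
  have hcodes : ∀ z ∈ (PySem.Set.ofList cs).map (fun c => (c.toNat : Int)),
      0 ≤ z ∧ z ≤ 126 := by
    intro z hz
    rw [List.mem_map] at hz
    obtain ⟨c, hc, rfl⟩ := hz
    exact ⟨Int.natCast_nonneg _, by
      have := hcs126 c ((PySem.Set.mem_ofList _ _).mp hc)
      omega⟩
  have hmn_bounds : 0 ≤ mn ∧ mn ≤ 126 := hcodes mn (PySem.List.min?_mem hmn)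
  have hmx_bounds : 0 ≤ mx ∧ mx ≤ 126 := hcodes mx (PySem.List.max?_mem hmx)
  -- the sweep: fold = runB over the present chars in code order
  rw [foldB buckets (PySem.List.pyRange mn (mx + 1) 1) [] 0, List.nil_append]
  -- the present codes of the range, as chars, are exactly us
  have hM : ((PySem.List.pyRange mn (mx + 1) 1).filter
        (fun code => buckets.contains (Char.ofNat code.toNat))).map
        (fun code => Char.ofNat code.toNat) = us := by
    have hLb : ∀ x ∈ (PySem.List.pyRange mn (mx + 1) 1).filter
        (fun code => buckets.contains (Char.ofNat code.toNat)), 0 ≤ x ∧ x ≤ 126 := by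
      intro x hx
      have := PySem.List.mem_pyRange_one.mp (List.mem_filter.mp hx).1
      omega
    have hpairM : (((PySem.List.pyRange mn (mx + 1) 1).filter
        (fun code => buckets.contains (Char.ofNat code.toNat))).map
        (fun code => Char.ofNat code.toNat)).Pairwise (· < ·) := by
      rw [List.pairwise_map]
      refine List.Pairwise.imp_of_mem ?_
        ((PySem.List.pairwise_lt_pyRange_one mn (mx + 1)).filter _)
      intro a b ha hb hab
      have hba := hLb a ha
      have hbb := hLb b hb
      rw [char_lt_iff, chr_toNat a.toNat (by omega), chr_toNat b.toNat (by omega)]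
      omega
    have hmemM : ∀ c, c ∈ ((PySem.List.pyRange mn (mx + 1) 1).filter
        (fun code => buckets.contains (Char.ofNat code.toNat))).map
        (fun code => Char.ofNat code.toNat) ↔ c ∈ PySem.Set.ofList cs := by
      intro c
      constructor
      · intro hcM
        rw [List.mem_map] at hcM
        obtain ⟨x, hx, rfl⟩ := hcM
        have hpres := (List.mem_filter.mp hx).2
        exact (PySem.Set.mem_ofList _ _).mpr ((hcontains _).mp hpres)
      · intro hcS
        have hc_cs : c ∈ cs := (PySem.Set.mem_ofList _ _).mp hcS
        have hcode_mem : ((c.toNat : Int)) ∈ (PySem.Set.ofList cs).map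
            (fun c => (c.toNat : Int)) := List.mem_map.mpr ⟨c, hcS, rfl⟩
        have h1 : mn ≤ (c.toNat : Int) := PySem.List.min?_isMin hmn _ hcode_mem
        have h2 : (c.toNat : Int) ≤ mx := PySem.List.max?_isMax hmx _ hcode_mem
        have hchr : Char.ofNat ((c.toNat : Int)).toNat = c := by
          rw [Int.toNat_natCast, Char.ofNat_toNat]
        refine List.mem_map.mpr ⟨(c.toNat : Int), List.mem_filter.mpr ⟨?_, ?_⟩, hchr⟩
        · exact PySem.List.mem_pyRange_one.mpr ⟨h1, by omega⟩
        · rw [hchr]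
          exact (hcontains c).mpr hc_cs
    have hpermM : (((PySem.List.pyRange mn (mx + 1) 1).filter
        (fun code => buckets.contains (Char.ofNat code.toNat))).map
        (fun code => Char.ofNat code.toNat)).Perm (PySem.Set.ofList cs) :=
      (List.perm_ext_iff_of_nodup
        (List.Pairwise.imp (fun h => ne_of_lt h) hpairM)
        (PySem.Set.nodup_ofList cs)).mpr hmemM
    exact (PySem.List.sorted_eq_of_perm_of_pairwise_lt _ _ (fun c => c) hpermM hpairM).symm
  rw [hM]
  have hgk : ∀ (k : Nat) (hk : k < us.length), g us[k] = 0 + (k : Int) := by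
    intro k hk
    show ((us.idxOf us[k] : Nat) : Int) = 0 + (k : Int)
    rw [hus_nodup.idxOf_getElem k hk]
    omega
  rw [runB_eq_flatMap (fun c => buckets.getD c []) g us 0 hgk]
  -- B's flatMap is the f-image of the char partition of cp
  have hGB : us.flatMap (fun c => (buckets.getD c []).map
        (fun i => (String.ofList [c], g c, i)))
      = (us.flatMap (fun c => cp.filter (fun p => p.1 == c))).map f := by
    rw [List.map_flatMap]
    refine List.flatMap_congr (fun c hc => ?_)
    rw [hbuck c, List.map_map]
    refine List.map_congr_left (fun p hp => ?_)
    have hp1 : p.1 = c := by simpa using (List.mem_filter.mp hp).2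
    simp [hf_def, hp1]
  rw [hGB]
  -- A's side: the dict lookup is g, and the final sort is exactly B's partition
  rw [PySem.List.foldl_append_singleton_eq_map, List.nil_append, sorted2_eq_sorted_toLex]
  have hmapA : cp.map (fun p : Char × Int =>
        (String.ofList [p.1],
         ((PySem.List.enumerate us 0).foldl (fun d q => d.insert q.2 q.1) PySem.Dict.empty).getD p.1 0,
         p.2))
      = cp.map f := by
    refine List.map_congr_left (fun p hp => ?_)
    have hp1 : p.1 ∈ cs := by
      rw [← hcp_fst]; exact List.mem_map.mpr ⟨p, hp, rfl⟩
    rw [hf_def, getD_rank us hus_nodup p.1 ((hmem_us p.1).mpr hp1), hg_def]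
  rw [hmapA]
  apply PySem.List.sorted_eq_of_perm_of_pairwise_lt
  · exact (partition_perm us cp hus_nodup (fun p hp => (hmem_us p.1).mpr
      (by rw [← hcp_fst]; exact List.mem_map.mpr ⟨p, hp, rfl⟩))).map f
  · rw [List.pairwise_map, List.pairwise_flatMap]
    constructor
    · intro c hc
      refine List.Pairwise.imp_of_mem ?_ (hcp_snd.filter (fun p => p.1 == c))
      intro x y hx hy hxy
      have hx1 : x.1 = c := by simpa using (List.mem_filter.mp hx).2
      have hy1 : y.1 = c := by simpa using (List.mem_filter.mp hy).2
      simp only [hf_def, Prod.Lex.toLex_lt_toLex]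
      exact Or.inr ⟨by rw [hx1, hy1], hxy⟩
    · refine List.Pairwise.imp ?_ hus_pair
      intro c c' hcc x hx y hy
      have hx1 : x.1 = c := by simpa using (List.mem_filter.mp hx).2
      have hy1 : y.1 = c' := by simpa using (List.mem_filter.mp hy).2
      simp only [hf_def, Prod.Lex.toLex_lt_toLex]
      exact Or.inl (by rw [hx1, hy1]; exact (ofList_singleton_lt_iff c c').mpr hcc)
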